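-- pv_equiv track=rewrite | github.com/pearu/parseonly | parseonly/utils.py | split_until_gt
-- ===== SOURCE A (Python) =====
-- def split_until_gt(text):
--   """Assuming that the preceding character of text was `<` (lt), split
--   the text at the matching `>` (gt) position and exclude '>' from the
--   return value. If the matching `>` was not found, return (None,
--   text).
--
--   Warning: if text contains shift operations (`<<`, '>>'), the result
--   will be most likely inaccurate.
--   """
--   stack = []
--   pmap = {'<': '>', '(': ')', '{': '}', '[': ']'}
--   n = len(text)
--   i = 0
--   string_sequence = None
--   slash_counts = 0
--   while i < n:
--     if string_sequence:
--       if text[i] == '\\':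
--         slash_counts += 1
--       elif text[i] == string_sequence and slash_counts % 2 == 0:
--         string_sequence = None
--         slash_counts = 0
--       else:
--         slash_counts = 0
--     elif text[i] == '"':
--       string_sequence = '"'
--       slash_counts = 0
--     elif text[i] == "'":
--       string_sequence = "'"
--       slash_counts = 0
--     elif not stack and text[i] == '>':
--       return text[:i], text[i+1:]
--     elif text[i] in pmap:
--       stack.append(pmap[text[i]])
--
--     elif stack and text[i] == stack[-1]:
--       stack.pop()
--     i += 1
--   return None, text
-- ===== SOURCE B (Python) =====
-- def _structural_tokens(text):
--   """Pass 1: the (index, char) pairs that lie outside string literals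
--   (quote characters themselves are consumed by the string machine)."""
--   tokens = []
--   seq = None
--   slashes = 0
--   for i, c in enumerate(text):
--     if seq:
--       if c == '\\':
--         slashes += 1
--       elif c == seq and slashes % 2 == 0:
--         seq = None
--         slashes = 0
--       else:
--         slashes = 0
--     elif c == '"' or c == "'":
--       seq = c
--       slashes = 0
--     else:
--       tokens.append((i, c))
--   return tokens
--
--
-- def _closer(c):
--   if c == '<':
--     return '>'
--   if c == '(':
--     return ')'
--   if c == '{':
--     return '}'
--   if c == '[':
--     return ']'
--   return None
--
--
-- def split_until_gt(text):
--   # Pass 2: plain bracket matching over the structural tokens only.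
--   stack = []
--   for i, c in _structural_tokens(text):
--     if not stack and c == '>':
--       return text[:i], text[i + 1:]
--     cl = _closer(c)
--     if cl is not None:
--       stack.append(cl)
--     elif stack and c == stack[-1]:
--       stack.pop()
--   return None, text
-- ===== Notes on version B (the rewrite author's own statement) =====
-- stated objective: alternative
-- what changed: Replaced A's single fused scanner (string-state machine interleaved with the bracket stack in one while loop) by two separate passes: pass 1 strips string literals and yields the structural (index, char) tokens, pass 2 does plain bracket matching over that token list.
import Mathlib
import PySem

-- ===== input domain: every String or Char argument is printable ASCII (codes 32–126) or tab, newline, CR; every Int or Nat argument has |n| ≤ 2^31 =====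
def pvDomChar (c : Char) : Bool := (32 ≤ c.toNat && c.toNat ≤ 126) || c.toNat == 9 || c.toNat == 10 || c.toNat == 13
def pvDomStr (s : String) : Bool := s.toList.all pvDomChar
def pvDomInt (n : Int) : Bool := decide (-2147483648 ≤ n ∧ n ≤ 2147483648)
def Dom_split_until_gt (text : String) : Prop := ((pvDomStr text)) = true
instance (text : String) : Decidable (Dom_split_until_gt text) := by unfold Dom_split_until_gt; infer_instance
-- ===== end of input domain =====

-- B replaces A's single fused scanner by two passes — a string-literal stripper
-- producing the structural (index, char) tokens, then plain bracket matching over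
-- those tokens (objective: simpler decomposition; same O(n) cost).

-- ===== PORT A =====
-- A's pmap dict literal
def pvPmapA : PySem.Dict Char Char :=
  PySem.Dict.ofList [('<', '>'), ('(', ')'), ('{', '}'), ('[', ']')]

-- A's while-loop: cs is the suffix text[i:], i the running index; stack head = stack[-1];
-- returns the index of the matching '>' (A's in-loop `return`) or none (fall through).
def loopA : List Char → Nat → List Char → Option Char → Nat → Option Nat
  | [], _, _, _, _ => none
  | c :: rest, i, stack, seq, sl =>
    match seq with
    | some q =>
      if c = '\\' then loopA rest (i + 1) stack (some q) (sl + 1)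
      else if c = q ∧ sl % 2 = 0 then loopA rest (i + 1) stack none 0
      else loopA rest (i + 1) stack (some q) 0
    | none =>
      if c = '"' then loopA rest (i + 1) stack (some '"') 0
      else if c = '\'' then loopA rest (i + 1) stack (some '\'') 0
      else if stack = [] ∧ c = '>' then some i
      else
        match pvPmapA.get? c with
        | some cl => loopA rest (i + 1) (cl :: stack) none sl
        | none =>
          match stack with
          | top :: _ => if c = top then loopA rest (i + 1) stack.tail none sl
                        else loopA rest (i + 1) stack none sl
          | [] => loopA rest (i + 1) stack none sl

-- text[:i] / text[i+1:] for 0 ≤ i < len(text): take i / drop (i+1) (exact there)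
def split_until_gt (text : String) : Option String × String :=
  match loopA text.toList 0 [] none 0 with
  | some i => (some (String.ofList (text.toList.take i)), String.ofList (text.toList.drop (i + 1)))
  | none => (none, text)

-- ===== PORT B =====
-- Source B pass 1: structural tokens (enumerate fold, string machine inline)
def structuralTokens : List Char → Nat → Option Char → Nat → List (Nat × Char)
  | [], _, _, _ => []
  | c :: rest, i, seq, sl =>
    match seq with
    | some q =>
      if c = '\\' then structuralTokens rest (i + 1) (some q) (sl + 1)
      else if c = q ∧ sl % 2 = 0 then structuralTokens rest (i + 1) none 0
      else structuralTokens rest (i + 1) (some q) 0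
    | none =>
      if c = '"' ∨ c = '\'' then structuralTokens rest (i + 1) (some c) 0
      else (i, c) :: structuralTokens rest (i + 1) none sl

-- Source B _closer
def closerOf (c : Char) : Option Char :=
  if c = '<' then some '>'
  else if c = '(' then some ')'
  else if c = '{' then some '}'
  else if c = '[' then some ']'
  else none

-- Source B pass 2: bracket matching over the tokens (stack head = stack[-1])
def matchTokens : List (Nat × Char) → List Char → Option Nat
  | [], _ => none
  | (i, c) :: ts, stack =>
    if stack = [] ∧ c = '>' then some i
    else
      match closerOf c with
      | some cl => matchTokens ts (cl :: stack)
      | none =>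
        match stack with
        | top :: rest => if c = top then matchTokens ts rest else matchTokens ts stack
        | [] => matchTokens ts stack

def split_until_gt_alt (text : String) : Option String × String :=
  match matchTokens (structuralTokens text.toList 0 none 0) [] with
  | some i => (some (String.ofList (text.toList.take i)), String.ofList (text.toList.drop (i + 1)))
  | none => (none, text)

-- ===== PRECONDITION & SPEC =====
def Spec_split_until_gt (text : String) (out : Option String × String) : Prop := out = split_until_gt_alt text
instance (text : String) (out : Option String × String) : Decidable (Spec_split_until_gt text out) := by unfold Spec_split_until_gt; infer_instance

-- ===== CLAIM (what is proved, stated in full; the proofs are below) =====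
def Claim_equal_split_until_gt : Prop := ∀ (text : String), Dom_split_until_gt text → Spec_split_until_gt text (split_until_gt text)

-- ===== LEMMAS AND PROOFS =====

-- A's dict lookup agrees with B's closerOf
theorem pvPmapA_mk : pvPmapA = PySem.Dict.mk [('<', '>'), ('(', ')'), ('{', '}'), ('[', ']')] := by
  decide

theorem pmap_eq_closerOf (c : Char) : pvPmapA.get? c = closerOf c := by
  rw [pvPmapA_mk]
  by_cases h1 : c = '<'
  · subst h1; rfl
  by_cases h2 : c = '('
  · subst h2; rfl
  by_cases h3 : c = '{'
  · subst h3; rfl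
  by_cases h4 : c = '['
  · subst h4; rfl
  simp only [PySem.Dict.get?_mk_cons, closerOf, beq_iff_eq]
  rw [if_neg (fun h => h1 h.symm), if_neg (fun h => h2 h.symm),
      if_neg (fun h => h3 h.symm), if_neg (fun h => h4 h.symm),
      if_neg h1, if_neg h2, if_neg h3, if_neg h4]
  rfl

-- the fused loop equals pass-2 applied to pass-1
theorem loopA_eq (cs : List Char) : ∀ (i : Nat) (stack : List Char) (seq : Option Char) (sl : Nat),
    loopA cs i stack seq sl = matchTokens (structuralTokens cs i seq sl) stack := by
  induction cs with
  | nil => intro i stack seq sl; rfl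
  | cons c rest ih =>
    intro i stack seq sl
    match seq with
    | some q =>
      simp only [loopA, structuralTokens]
      split_ifs <;> exact ih ..
    | none =>
      simp only [loopA, structuralTokens, pmap_eq_closerOf]
      by_cases hq : c = '"'
      · simp [hq, ih]
      · by_cases hq' : c = '\''
        · simp [hq', ih]
        · simp only [hq, hq', or_self, if_false, matchTokens]
          split_ifs with h
          · rfl
          · cases hcl : closerOf c with
            | some cl => exact ih ..
            | none =>
              cases stack with
              | nil => exact ih ..
              | cons top rest' =>
                by_cases ht : c = top <;> simp [ht, ih]

-- ===== VERDICT (by name: the statement is the Claim_ definition above) =====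
theorem split_until_gt_spec : Claim_equal_split_until_gt := by
  intro text _
  unfold Spec_split_until_gt
  simp only [split_until_gt, split_until_gt_alt, loopA_eq]
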